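-- pv_equiv track=rewrite | github.com/D-Hite/UOSRML-SummaryReport | Summary_Reports.py | find_runlist
-- ===== SOURCE A (Python) =====
-- def find_runlist(r_list, missing_days, lmd):
--     """
--     runlist, missing days
--     find whether there are runs of missing days
--     """
--     if lmd == 1:
--         return r_list
--     else:
--         if (missing_days[1] - missing_days[0]) == 1:
--             r_list.append(1)
--         else:
--             r_list.append(0)
--     return find_runlist(r_list, missing_days[1:], lmd-1)
-- ===== SOURCE B (Python) =====
-- def find_runlist(r_list, missing_days, lmd):
--     i = 0
--     while lmd != 1:
--         r_list.append(1 if missing_days[i + 1] - missing_days[i] == 1 else 0)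
--         i += 1
--         lmd -= 1
--     return r_list
-- ===== Notes on version B (the rewrite author's own statement) =====
-- stated objective: faster
-- what changed: Replaces A's recursion over ever-shorter list slices with a single iterative while-loop that walks an index over missing_days and appends each pair's flag, with no slicing and no recursion.
import Mathlib
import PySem

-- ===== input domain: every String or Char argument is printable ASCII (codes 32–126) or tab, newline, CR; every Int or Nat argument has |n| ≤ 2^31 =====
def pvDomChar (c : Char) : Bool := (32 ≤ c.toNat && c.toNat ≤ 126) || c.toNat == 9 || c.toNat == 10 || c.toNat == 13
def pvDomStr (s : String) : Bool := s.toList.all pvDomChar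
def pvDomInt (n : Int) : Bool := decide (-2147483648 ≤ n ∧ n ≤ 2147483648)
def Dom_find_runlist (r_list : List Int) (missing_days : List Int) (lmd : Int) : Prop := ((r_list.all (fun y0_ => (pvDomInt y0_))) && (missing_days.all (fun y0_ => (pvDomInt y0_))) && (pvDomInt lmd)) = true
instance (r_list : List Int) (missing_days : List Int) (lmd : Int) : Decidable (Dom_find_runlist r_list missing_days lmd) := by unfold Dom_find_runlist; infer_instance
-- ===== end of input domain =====

-- B replaces A's recursion over ever-shorter slices with one indexed loop over range(lmd-1) (simpler);
-- both Pythons append to the caller's r_list in place, so the equivalence proved is about the return value.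

-- ===== PORT A =====
-- Literal port of A's recursion. Where Python raises IndexError (pyGet? = none) the port returns the
-- list built so far, and for lmd < 1 (where Python never returns normally) a totality guard stops the
-- recursion — both regions are excluded by Pre_find_runlist.
def find_runlist (r_list : List Int) (missing_days : List Int) (lmd : Int) : List Int :=
  if lmd = 1 then r_list
  else
    match PySem.List.pyGet? missing_days 1, PySem.List.pyGet? missing_days 0 with
    | some b, some a =>
        let r' := r_list ++ [if b - a = 1 then (1 : Int) else 0]
        if h : 1 < lmd then
          find_runlist r' (PySem.List.slice missing_days (some 1) none) (lmd - 1)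
        else r'
    | _, _ => r_list
  termination_by lmd.toNat
  decreasing_by omega

-- ===== PORT B =====
-- Literal port of Source B: the `while lmd != 1` loop, iterating a state (r_list, i, lmd).
-- The fuel argument only bounds the iterations (inside Pre_ it is never exhausted; for lmd < 1
-- the Python while-loop never terminates normally).
def find_runlist_alt_go (md : List Int) : Nat → List Int → Nat → Int → List Int
  | 0, r, _, _ => r
  | fuel + 1, r, i, lmd =>
    if lmd = 1 then r
    else
      let d := (PySem.List.pyGet? md ((i : Int) + 1)).getD 0 - (PySem.List.pyGet? md (i : Int)).getD 0
      find_runlist_alt_go md fuel (r ++ [if d = 1 then (1 : Int) else 0]) (i + 1) (lmd - 1)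

def find_runlist_alt (r_list : List Int) (missing_days : List Int) (lmd : Int) : List Int :=
  find_runlist_alt_go missing_days lmd.toNat r_list 0 lmd

-- ===== PRECONDITION & SPEC =====
-- A returns normally iff lmd = 1, or 2 ≤ lmd ≤ len(missing_days): for lmd ≤ 0 the recursion never
-- reaches its base case (eventual IndexError), and for lmd > len it runs out of elements (IndexError).
def Pre_find_runlist (r_list : List Int) (missing_days : List Int) (lmd : Int) : Prop :=
  lmd = 1 ∨ (2 ≤ lmd ∧ lmd ≤ missing_days.length)
instance (r_list : List Int) (missing_days : List Int) (lmd : Int) : Decidable (Pre_find_runlist r_list missing_days lmd) := by unfold Pre_find_runlist; infer_instance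

def pvWitness_find_runlist : List Int × List Int × Int := ([0], [3, 4, 6, 7], 4)

def Spec_find_runlist (r_list : List Int) (missing_days : List Int) (lmd : Int) (out : List Int) : Prop := out = find_runlist_alt r_list missing_days lmd
instance (r_list : List Int) (missing_days : List Int) (lmd : Int) (out : List Int) : Decidable (Spec_find_runlist r_list missing_days lmd out) := by unfold Spec_find_runlist; infer_instance

-- ===== CLAIM (what is proved, stated in full; the proofs are below) =====
def Claim_equal_find_runlist : Prop := ∀ (r_list : List Int) (missing_days : List Int) (lmd : Int), Dom_find_runlist r_list missing_days lmd → Pre_find_runlist r_list missing_days lmd → Spec_find_runlist r_list missing_days lmd (find_runlist r_list missing_days lmd)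

-- ===== LEMMAS AND PROOFS =====

-- shifting the index past a dropped head element
theorem find_runlist_go_shift (a : Int) (md : List Int) :
    ∀ (fuel : Nat) (r : List Int) (i : Nat) (lmd : Int),
    find_runlist_alt_go (a :: md) fuel r (i + 1) lmd = find_runlist_alt_go md fuel r i lmd := by
  intro fuel
  induction fuel with
  | zero => intro r i lmd; rfl
  | succ fuel ih =>
      intro r i lmd
      rw [find_runlist_alt_go, find_runlist_alt_go]
      by_cases h : lmd = 1
      · simp [h]
      · simp only [if_neg h]
        have c2 : ((i + 1 : Nat) : Int) = (i : Int) + 1 := by push_cast; ring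
        rw [c2, PySem.List.pyGet?_cons_succ a md i,
            show (i : Int) + 1 + 1 = ((i + 1 : Nat) : Int) + 1 by omega,
            PySem.List.pyGet?_cons_succ a md (i + 1), c2, ih]

theorem find_runlist_key (n : Nat) : ∀ (r md : List Int), n < md.length →
    find_runlist r md ((n : Int) + 1) = find_runlist_alt r md ((n : Int) + 1) := by
  induction n with
  | zero =>
      intro r md _
      simp [find_runlist, find_runlist_alt, find_runlist_alt_go]
  | succ n ih =>
      intro r md hlen
      have hc : ((n + 1 : Nat) : Int) = (n : Int) + 1 := by push_cast; ring
      rw [hc]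
      obtain ⟨a, md', rfl⟩ : ∃ a md', md = a :: md' := by
        cases md with
        | nil => simp at hlen
        | cons a md' => exact ⟨a, md', rfl⟩
      obtain ⟨b, md'', rfl⟩ : ∃ b md'', md' = b :: md'' := by
        cases md' with
        | nil => simp at hlen
        | cons b md'' => exact ⟨b, md'', rfl⟩
      have h1 : ((n : Int) + 1 + 1) ≠ 1 := by omega
      have h2 : (1 : Int) < (n : Int) + 1 + 1 := by omega
      have hget1 : PySem.List.pyGet? (a :: b :: md'') 1 = some b := by
        have := PySem.List.pyGet?_cons_succ a (b :: md'') 0; simpa using this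
      have hget0 : PySem.List.pyGet? (a :: b :: md'') 0 = some a :=
        PySem.List.pyGet?_zero_cons a (b :: md'')
      have hsl : PySem.List.slice (a :: b :: md'') (some 1) none = b :: md'' :=
        PySem.List.slice_from_one _
      rw [find_runlist, if_neg h1, hget1, hget0]
      simp only [dif_pos h2, hsl]
      have e1 : (n : Int) + 1 + 1 - 1 = (n : Int) + 1 := by ring
      rw [e1, ih _ (b :: md'') (by simpa using hlen)]
      -- unfold one iteration of B's while loop and shift the index
      show find_runlist_alt (r ++ [if b - a = 1 then (1 : Int) else 0]) (b :: md'') ((n : Int) + 1)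
         = find_runlist_alt r (a :: b :: md'') ((n : Int) + 1 + 1)
      unfold find_runlist_alt
      have t1 : ((n : Int) + 1).toNat = n + 1 := by omega
      have t2 : ((n : Int) + 1 + 1).toNat = n + 2 := by omega
      rw [t1, t2]
      conv_rhs => rw [find_runlist_alt_go, if_neg h1]
      simp only [Nat.cast_zero, zero_add, hget1, hget0, Option.getD_some, e1]
      conv_rhs => rw [show (1 : Nat) = 0 + 1 from rfl]
      rw [find_runlist_go_shift a (b :: md'') (n + 1) _ 0]

-- ===== VERDICT (by name: the statement is the Claim_ definition above) =====
theorem find_runlist_spec : Claim_equal_find_runlist := by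
  intro r md lmd _ hpre
  unfold Spec_find_runlist
  rcases hpre with h1 | ⟨h2, h3⟩
  · subst h1; simp [find_runlist, find_runlist_alt, find_runlist_alt_go]
  · obtain ⟨n, hn⟩ : ∃ n : Nat, lmd = (n : Int) + 1 := ⟨(lmd - 1).toNat, by omega⟩
    subst hn
    exact find_runlist_key n r md (by omega)
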